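-- pv_equiv track=rewrite | github.com/mark77234/Algorithm | 프로그래머스/2/340211. ［PCCP 기출문제］ 3번 ／ 충돌위험 찾기/［PCCP 기출문제］ 3번 ／ 충돌위험 찾기.py | solution
-- ===== SOURCE A (Python) =====
-- from collections import defaultdict,Counter
--
-- def solution(points, routes):
--     dict = defaultdict(list)
--     answer = 0
--
--     for route in routes: # 모든 루트
--         start = route[0] # 루트의 첫번째 시작번호
--         x,y = points[start-1] # 시작 x,y 좌표
--         number = 0
--         dict[number].append((x,y))
--
--         for i in range(1,len(route)): # 나머지 남은 좌표
--             end = route[i] # 도착번호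
--             end_x,end_y = points[end-1] # 도착 x,y 좌표
--
--             while x != end_x: # x 좌표가 다를 경우
--                 if x < end_x: # x 좌표가 도착좌표보다 크면
--                     x += 1
--                 else: # 작으면
--                     x -= 1
--                 number += 1 # 움직였으니까 +1
--                 dict[number].append((x,y)) # 딕셔너리 해당 인덱스 번호에 추가(나중에 겹치는거 세줄거)
--
--             while y != end_y: # y 좌표 마찬가지
--                 if y < end_y:
--                     y += 1
--                 else:
--                     y -= 1
--
--                 number += 1
--                 dict[number].append((x,y))
--
--
--     for key in dict:
--         count = Counter(dict[key])
--         for key in count: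
--
--             if count[key] > 1:
--                 answer += 1
--     return answer
-- ===== SOURCE B (Python) =====
-- def solution(points, routes):
--     # Build every robot's full trajectory as a pure list, tag with times via
--     # enumerate, then sort all (time, x, y) events and count duplicate runs
--     # in one adjacency scan (sort-based duplicate detection, no dict/Counter).
--     events = []
--     for route in routes:
--         x, y = points[route[0] - 1]
--         traj = [(x, y)]
--         for idx in route[1:]:
--             ex, ey = points[idx - 1]
--             sx = 1 if x < ex else -1
--             traj += [(nx, y) for nx in range(x + sx, ex + sx, sx)]
--             sy = 1 if y < ey else -1
--             traj += [(ex, ny) for ny in range(y + sy, ey + sy, sy)]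
--             x, y = ex, ey
--         events += [(t, px, py) for t, (px, py) in enumerate(traj)]
--     events.sort()
--     ans = 0
--     rest = events
--     while rest:
--         j = 1
--         while j < len(rest) and rest[j] == rest[0]:
--             j += 1
--         if j > 1:
--             ans += 1
--         rest = rest[j:]
--     return ans
-- ===== Notes on version B (the rewrite author's own statement) =====
-- stated objective: alternative
-- what changed: B replaces A's hash-based grouping (defaultdict of per-timestep position lists, then a Counter per bucket scanned for multiplicities >1) by sort-based duplicate detection: each robot's trajectory is built as a pure list (range comprehensions, no dict mutation inside the walk), tagged with times by enumerate, and all (time,x,y) events are sorted once and scanned for adjacent runs of length >1.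
import Mathlib
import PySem

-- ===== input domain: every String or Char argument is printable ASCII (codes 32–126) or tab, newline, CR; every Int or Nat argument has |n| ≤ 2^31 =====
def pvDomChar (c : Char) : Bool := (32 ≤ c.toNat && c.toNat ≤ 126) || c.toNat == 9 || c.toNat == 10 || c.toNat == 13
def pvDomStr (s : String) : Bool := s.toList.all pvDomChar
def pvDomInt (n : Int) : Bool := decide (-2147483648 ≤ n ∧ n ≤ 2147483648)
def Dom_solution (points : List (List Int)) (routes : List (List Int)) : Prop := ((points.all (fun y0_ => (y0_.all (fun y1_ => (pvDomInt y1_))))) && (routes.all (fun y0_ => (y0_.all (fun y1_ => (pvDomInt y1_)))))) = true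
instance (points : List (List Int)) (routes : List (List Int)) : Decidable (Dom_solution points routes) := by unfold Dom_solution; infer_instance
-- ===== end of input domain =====

-- B replaces A's hash-based grouping (time-keyed defaultdict of positions + a Counter per
-- bucket) by sort-based duplicate detection: pure trajectory lists tagged by enumerate,
-- one lexicographic sort of all (time,x,y) events, one adjacency run scan (objective: alternative).

-- ===== PORT A =====
-- the inner `while x != end_x` loop of A (mutates x, number, dict)
def solWalkX (ex y : Int) (x n : Int) (d : PySem.Dict Int (List (Int × Int))) :
    Int × Int × PySem.Dict Int (List (Int × Int)) :=
  if x = ex then (x, n, d)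
  else if x < ex then
    solWalkX ex y (x + 1) (n + 1) (d.modify (n + 1) [] (· ++ [(x + 1, y)]))
  else
    solWalkX ex y (x - 1) (n + 1) (d.modify (n + 1) [] (· ++ [(x - 1, y)]))
termination_by (ex - x).natAbs
decreasing_by all_goals omega

-- the inner `while y != end_y` loop of A
def solWalkY (x ey : Int) (y n : Int) (d : PySem.Dict Int (List (Int × Int))) :
    Int × Int × PySem.Dict Int (List (Int × Int)) :=
  if y = ey then (y, n, d)
  else if y < ey then
    solWalkY x ey (y + 1) (n + 1) (d.modify (n + 1) [] (· ++ [(x, y + 1)]))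
  else
    solWalkY x ey (y - 1) (n + 1) (d.modify (n + 1) [] (· ++ [(x, y - 1)]))
termination_by (ey - y).natAbs
decreasing_by all_goals omega

def solution (points : List (List Int)) (routes : List (List Int)) : Int :=
  let d := routes.foldl (fun d route =>
      let start := PySem.List.pyGetD route 0 0
      let p := PySem.List.pyGetD points (start - 1) []
      let x := PySem.List.pyGetD p 0 0
      let y := PySem.List.pyGetD p 1 0
      let d := d.modify 0 [] (· ++ [(x, y)])
      let st := (PySem.List.pyRange 1 (PySem.List.len route)).foldl
          (fun st i =>
            let q := PySem.List.pyGetD points (PySem.List.pyGetD route i 0 - 1) []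
            let ex := PySem.List.pyGetD q 0 0
            let ey := PySem.List.pyGetD q 1 0
            let r1 := solWalkX ex st.2.1 st.1 st.2.2.1 st.2.2.2
            let r2 := solWalkY r1.1 ey st.2.1 r1.2.1 r1.2.2
            (r1.1, r2.1, r2.2.1, r2.2.2))
          (x, y, (0 : Int), d)
      st.2.2.2)
    PySem.Dict.empty
  d.keys.foldl (fun answer key =>
      let count := PySem.Dict.counter (d.getD key [])
      count.keys.foldl (fun answer c => if count.getD c 0 > 1 then answer + 1 else answer)
        answer)
    0

-- ===== PORT B =====
-- the final `while rest: … rest = rest[j:]` adjacency run scan of Source B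
def runDups : List (Int × Int × Int) → Int
  | [] => 0
  | a :: t =>
    (if 1 < 1 + (t.takeWhile (fun b => b == a)).length then (1 : Int) else 0) +
      runDups (t.dropWhile (fun b => b == a))
termination_by l => l.length
decreasing_by
  exact Nat.lt_succ_of_le (t.length_dropWhile_le _)

def solution_alt (points : List (List Int)) (routes : List (List Int)) : Int :=
  let events := routes.foldl (fun evs route =>
      let p := PySem.List.pyGetD points (PySem.List.pyGetD route 0 0 - 1) []
      let x := PySem.List.pyGetD p 0 0
      let y := PySem.List.pyGetD p 1 0
      let st := (PySem.List.slice route (some 1) none).foldl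
          (fun (st : Int × Int × List (Int × Int)) idx =>
            let q := PySem.List.pyGetD points (idx - 1) []
            let ex := PySem.List.pyGetD q 0 0
            let ey := PySem.List.pyGetD q 1 0
            let sx := if st.1 < ex then (1 : Int) else -1
            let tr := st.2.2 ++
              (PySem.List.pyRange (st.1 + sx) (ex + sx) sx).map (fun nx => (nx, st.2.1))
            let sy := if st.2.1 < ey then (1 : Int) else -1
            let tr2 := tr ++
              (PySem.List.pyRange (st.2.1 + sy) (ey + sy) sy).map (fun ny => (ex, ny))
            (ex, ey, tr2))
          (x, y, [(x, y)])
      evs ++ (PySem.List.enumerate st.2.2 0).map (fun tp => (tp.1, tp.2.1, tp.2.2)))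
    ([] : List (Int × Int × Int))
  -- events.sort(): Python's lexicographic tuple order is the Lex order on Int × Int × Int
  runDups (PySem.List.sorted events (fun e => toLex (e.1, toLex (e.2.1, e.2.2))) false)

-- ===== PRECONDITION & SPEC =====
-- Pre_ excludes exactly the inputs where the Python A raises: an empty route (route[0] is an
-- IndexError), a route entry e with index e-1 out of Python range for points (IndexError), or
-- a referenced point that is not a pair (unpacking 'x, y = points[...]' raises ValueError).
def Pre_solution (points : List (List Int)) (routes : List (List Int)) : Prop :=
  ∀ r ∈ routes, r ≠ [] ∧ ∀ e ∈ r,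
    PySem.Raise.InRange points.length (e - 1) ∧
    (PySem.List.pyGetD points (e - 1) []).length = 2
instance (points : List (List Int)) (routes : List (List Int)) :
    Decidable (Pre_solution points routes) := by unfold Pre_solution; infer_instance

def pvWitness_solution : List (List Int) × List (List Int) :=
  ([[0, 0], [2, 1]], [[1, 2], [2, 1]])

def Spec_solution (points : List (List Int)) (routes : List (List Int)) (out : Int) : Prop := out = solution_alt points routes
instance (points : List (List Int)) (routes : List (List Int)) (out : Int) : Decidable (Spec_solution points routes out) := by unfold Spec_solution; infer_instance

-- ===== CLAIM (what is proved, stated in full; the proofs are below) =====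
def Claim_equal_solution : Prop := ∀ (points : List (List Int)) (routes : List (List Int)), Dom_solution points routes → Pre_solution points routes → Spec_solution points routes (solution points routes)

-- ===== LEMMAS AND PROOFS =====

def stepA (d : PySem.Dict Int (List (Int × Int))) (e : Int × Int × Int) :
    PySem.Dict Int (List (Int × Int)) := d.modify e.1 [] (· ++ [e.2])

def stamp : Int → List (Int × Int) → List (Int × Int × Int)
  | _, [] => []
  | n, c :: cs => (n + 1, c) :: stamp (n + 1) cs

def seg (a b : Int) : List Int :=
  if a < b then PySem.List.pyRange (a + 1) (b + 1) 1
  else PySem.List.pyRange (a - 1) (b - 1) (-1)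

lemma seg_self (a : Int) : seg a a = [] := by
  simp [seg, PySem.List.pyRange]

lemma seg_up {a b : Int} (h : a < b) : seg a b = (a + 1) :: seg (a + 1) b := by
  rw [seg, if_pos h, PySem.List.pyRange_one_cons (by omega)]
  by_cases h2 : a + 1 < b
  · rw [seg, if_pos h2]
  · have : a + 1 = b := by omega
    subst this
    simp [seg, PySem.List.pyRange]

lemma seg_down {a b : Int} (h : b < a) : seg a b = (a - 1) :: seg (a - 1) b := by
  rw [seg, if_neg (by omega), PySem.List.pyRange_neg_one_cons (by omega)]
  by_cases h2 : b < a - 1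
  · rw [seg, if_neg (by omega)]
  · have : a - 1 = b := by omega
    subst this
    simp [seg, PySem.List.pyRange]

lemma walkX_eq (ex y x n : Int) (d : PySem.Dict Int (List (Int × Int))) :
    solWalkX ex y x n d =
      (ex, n + (seg x ex).length,
        (stamp n ((seg x ex).map (fun nx => (nx, y)))).foldl stepA d) := by
  rw [solWalkX]
  by_cases h : x = ex
  · subst h
    simp [seg_self, stamp]
  · rw [if_neg h]
    by_cases h2 : x < ex
    · rw [if_pos h2, seg_up h2, walkX_eq]
      simp only [stamp, List.map_cons, List.foldl_cons, List.length_cons, Prod.mk.injEq, stepA]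
      exact ⟨trivial, by push_cast; ring, trivial⟩
    · rw [if_neg h2, seg_down (show ex < x by omega), walkX_eq]
      simp only [stamp, List.map_cons, List.foldl_cons, List.length_cons, Prod.mk.injEq, stepA]
      exact ⟨trivial, by push_cast; ring, trivial⟩
termination_by (ex - x).natAbs
decreasing_by all_goals omega

lemma walkY_eq (x ey y n : Int) (d : PySem.Dict Int (List (Int × Int))) :
    solWalkY x ey y n d =
      (ey, n + (seg y ey).length,
        (stamp n ((seg y ey).map (fun ny => (x, ny)))).foldl stepA d) := by
  rw [solWalkY]
  by_cases h : y = ey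
  · subst h
    simp [seg_self, stamp]
  · rw [if_neg h]
    by_cases h2 : y < ey
    · rw [if_pos h2, seg_up h2, walkY_eq]
      simp only [stamp, List.map_cons, List.foldl_cons, List.length_cons, Prod.mk.injEq, stepA]
      exact ⟨trivial, by push_cast; ring, trivial⟩
    · rw [if_neg h2, seg_down (show ey < y by omega), walkY_eq]
      simp only [stamp, List.map_cons, List.foldl_cons, List.length_cons, Prod.mk.injEq, stepA]
      exact ⟨trivial, by push_cast; ring, trivial⟩
termination_by (ey - y).natAbs
decreasing_by all_goals omega

def getPt (points : List (List Int)) (e : Int) : Int × Int :=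
  (PySem.List.pyGetD (PySem.List.pyGetD points (e - 1) []) 0 0,
   PySem.List.pyGetD (PySem.List.pyGetD points (e - 1) []) 1 0)

def evSteps (points : List (List Int)) : List Int → Int → Int → Int → List (Int × Int × Int)
  | [], _, _, _ => []
  | e :: rest, x, y, n =>
    stamp n ((seg x (getPt points e).1).map (fun nx => (nx, y))) ++
    (stamp (n + (seg x (getPt points e).1).length)
      ((seg y (getPt points e).2).map (fun ny => ((getPt points e).1, ny))) ++
    evSteps points rest (getPt points e).1 (getPt points e).2
      (n + (seg x (getPt points e).1).length + (seg y (getPt points e).2).length))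

def finPos (points : List (List Int)) : List Int → Int × Int × Int → Int × Int × Int
  | [], s => s
  | e :: rest, s =>
    finPos points rest ((getPt points e).1, (getPt points e).2,
      s.2.2 + (seg s.1 (getPt points e).1).length + (seg s.2.1 (getPt points e).2).length)

def bodyA (points : List (List Int))
    (st : Int × Int × Int × PySem.Dict Int (List (Int × Int))) (e : Int) :
    Int × Int × Int × PySem.Dict Int (List (Int × Int)) :=
  let q := PySem.List.pyGetD points (e - 1) []
  let ex := PySem.List.pyGetD q 0 0
  let ey := PySem.List.pyGetD q 1 0
  let r1 := solWalkX ex st.2.1 st.1 st.2.2.1 st.2.2.2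
  let r2 := solWalkY r1.1 ey st.2.1 r1.2.1 r1.2.2
  (r1.1, r2.1, r2.2.1, r2.2.2)

lemma stepsA (points : List (List Int)) (rest : List Int) (x y n : Int)
    (d : PySem.Dict Int (List (Int × Int))) :
    rest.foldl (bodyA points) (x, y, n, d) =
      ((finPos points rest (x, y, n)).1, (finPos points rest (x, y, n)).2.1,
        (finPos points rest (x, y, n)).2.2,
        (evSteps points rest x y n).foldl stepA d) := by
  induction rest generalizing x y n d with
  | nil => simp [finPos, evSteps]
  | cons e rest ih =>
    rw [List.foldl_cons]
    have hb : bodyA points (x, y, n, d) e =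
        ((getPt points e).1, (getPt points e).2,
          n + (seg x (getPt points e).1).length + (seg y (getPt points e).2).length,
          ((stamp n ((seg x (getPt points e).1).map (fun nx => (nx, y)))) ++
            stamp (n + (seg x (getPt points e).1).length)
              ((seg y (getPt points e).2).map (fun ny => ((getPt points e).1, ny)))).foldl
            stepA d) := by
      simp only [bodyA, walkX_eq, walkY_eq, getPt, List.foldl_append]

    rw [hb, ih]
    simp only [evSteps, finPos, List.foldl_append]

lemma count_filter_snd (L : List (Int × Int × Int)) (a : Int) (b : Int × Int) :
    ((L.filter (fun e => e.1 == a)).map (fun e => e.2)).count b = L.count (a, b) := by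
  induction L with
  | nil => simp
  | cons h t ih =>
    by_cases h1 : h.1 = a
    · by_cases h2 : h.2 = b
      · have : h = (a, b) := by cases h; simp_all
        subst this
        simp [ih]
      · rw [List.filter_cons_of_pos (by simpa using h1), List.map_cons,
          List.count_cons, List.count_cons, ih]
        simp [h2, show h ≠ (a, b) by cases h; simp_all]
    · rw [List.filter_cons_of_neg (by simpa using h1), List.count_cons, ih]
      simp [show h ≠ (a, b) by cases h; simp_all]

lemma group_perm (L : List (Int × Int × Int)) :
    ((PySem.Set.ofList (L.map (·.1))).flatMap
        (fun a => (PySem.Set.ofList ((L.filter (fun e => e.1 == a)).map (·.2))).map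
          (fun b => (a, b)))).Perm (PySem.Set.ofList L) := by
  rw [List.perm_ext_iff_of_nodup ?nd (PySem.Set.nodup_ofList L)]
  case nd =>
    rw [List.nodup_flatMap]
    constructor
    · intro a _
      exact (PySem.Set.nodup_ofList _).map (fun b1 b2 h => by simpa using congrArg Prod.snd h)
    · refine (PySem.Set.nodup_ofList _).imp ?_
      intro a a' hne z hz hz'
      simp only [List.mem_map] at hz hz'
      obtain ⟨b, _, rfl⟩ := hz
      obtain ⟨b', _, h⟩ := hz'
      exact hne (by simpa using (congrArg Prod.fst h).symm)
  intro z
  simp only [List.mem_flatMap, List.mem_map, PySem.Set.mem_ofList, List.mem_filter]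
  constructor
  · rintro ⟨a, ⟨e, he, rfl⟩, b, ⟨e', ⟨he', hfst⟩, rfl⟩, rfl⟩
    have : e' = (e'.1, e'.2) := rfl
    simp only [beq_iff_eq] at hfst
    rw [← hfst, ← this]
    exact he'
  · intro hz
    exact ⟨z.1, ⟨z, hz, rfl⟩, z.2, ⟨z, ⟨hz, by simp⟩, rfl⟩, rfl⟩

lemma key_count (L : List (Int × Int × Int)) (q : Int × Int × Int → Bool) :
    ((PySem.Set.ofList (L.map (·.1))).map
        (fun a => List.countP (fun b => q (a, b))
          (PySem.Set.ofList ((L.filter (fun e => e.1 == a)).map (·.2))))).sum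
      = List.countP q (PySem.Set.ofList L) := by
  rw [← (group_perm L).countP_eq q, List.countP_flatMap]
  congr 1
  apply List.map_congr_left
  intro a _
  simp only [Function.comp_apply, List.countP_map]
  rfl

def evRoute (points : List (List Int)) (route : List Int) : List (Int × Int × Int) :=
  (0, getPt points (PySem.List.pyGetD route 0 0)) ::
    evSteps points route.tail (getPt points (PySem.List.pyGetD route 0 0)).1
      (getPt points (PySem.List.pyGetD route 0 0)).2 0

lemma routeA (points : List (List Int)) (d : PySem.Dict Int (List (Int × Int))) (route : List Int) :
    (fun d route =>
      let start := PySem.List.pyGetD route 0 0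
      let p := PySem.List.pyGetD points (start - 1) []
      let x := PySem.List.pyGetD p 0 0
      let y := PySem.List.pyGetD p 1 0
      let d := d.modify 0 [] (· ++ [(x, y)])
      let st := (PySem.List.pyRange 1 (PySem.List.len route)).foldl
          (fun st i =>
            let q := PySem.List.pyGetD points (PySem.List.pyGetD route i 0 - 1) []
            let ex := PySem.List.pyGetD q 0 0
            let ey := PySem.List.pyGetD q 1 0
            let r1 := solWalkX ex st.2.1 st.1 st.2.2.1 st.2.2.2
            let r2 := solWalkY r1.1 ey st.2.1 r1.2.1 r1.2.2
            (r1.1, r2.1, r2.2.1, r2.2.2))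
          (x, y, (0 : Int), d)
      st.2.2.2) d route = (evRoute points route).foldl stepA d := by
  have hlam : (fun (st : Int × Int × Int × PySem.Dict Int (List (Int × Int))) (i : Int) =>
      let q := PySem.List.pyGetD points (PySem.List.pyGetD route i 0 - 1) []
      let ex := PySem.List.pyGetD q 0 0
      let ey := PySem.List.pyGetD q 1 0
      let r1 := solWalkX ex st.2.1 st.1 st.2.2.1 st.2.2.2
      let r2 := solWalkY r1.1 ey st.2.1 r1.2.1 r1.2.2
      (r1.1, r2.1, r2.2.1, r2.2.2)) =
      (fun st i => bodyA points st (PySem.List.pyGetD route i 0)) := rfl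
  simp only [hlam]
  rw [PySem.List.foldl_pyRange_pyGetD route 0 (bodyA points) _ (by norm_num)]
  rw [show ((1:Int)).toNat = 1 from rfl, List.drop_one, stepsA]
  simp only [evRoute, List.foldl_cons, stepA, getPt]

lemma ansA (E : List (Int × Int × Int)) :
    (E.foldl stepA PySem.Dict.empty).keys.foldl (fun answer key =>
        let count := PySem.Dict.counter ((E.foldl stepA PySem.Dict.empty).getD key [])
        count.keys.foldl (fun answer c => if count.getD c 0 > 1 then answer + 1 else answer)
          answer) (0 : Int)
      = ↑(List.countP (fun e => decide (1 < E.count e)) (PySem.Set.ofList E)) := by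
  have hstep : stepA = (fun d (e : Int × Int × Int) => d.modify e.1 [] (fun v => v ++ [e.2])) := rfl
  have hk : (E.foldl stepA PySem.Dict.empty).keys = PySem.Set.ofList (E.map (·.1)) := by
    rw [hstep, PySem.Dict.keys_foldl_modify_key E (fun e => e.1) [] (fun _ e => fun v => v ++ [e.2])]
    simp [PySem.Set.update_nil_left]
  have hg : ∀ k, (E.foldl stepA PySem.Dict.empty).getD k [] =
      (E.filter (fun e => e.1 == k)).map (·.2) := by
    intro k
    rw [hstep, PySem.Dict.getD_foldl_modify_append]
    simp
  have hlam : (fun (answer : Int) key =>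
      (PySem.Dict.counter ((E.foldl stepA PySem.Dict.empty).getD key [])).keys.foldl
        (fun answer c =>
          if (PySem.Dict.counter ((E.foldl stepA PySem.Dict.empty).getD key [])).getD c 0 > 1
          then answer + 1 else answer) answer)
      = (fun answer k => answer + ↑(List.countP (fun b => decide (1 < E.count (k, b)))
          (PySem.Set.ofList ((E.filter (fun e => e.1 == k)).map (·.2))))) := by
    funext a k
    simp only [hg, PySem.Dict.keys_counter]
    have hin : (fun (answer : Int) c =>
        if (PySem.Dict.counter ((E.filter (fun e => e.1 == k)).map (·.2))).getD c 0 > 1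
        then answer + 1 else answer)
        = (fun (answer : Int) c =>
            if (fun c => decide (1 < E.count (k, c))) c = true then answer + 1 else answer) := by
      funext a2 c
      rw [PySem.Dict.getD_counter, count_filter_snd]
      simp only [gt_iff_lt, Nat.one_lt_cast, decide_eq_true_eq]
    rw [hin, PySem.List.foldl_count_if]
  refine Eq.trans (congrFun (congrFun (congrArg List.foldl hlam) (0 : Int))
    ((List.foldl stepA PySem.Dict.empty E).keys)) ?_
  rw [PySem.List.foldl_add, hk, zero_add]
  rw [← key_count E (fun e => decide (1 < E.count e)), Nat.cast_list_sum, List.map_map]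
  rfl

-- ===== B-side lemmas =====

def posCat (points : List (List Int)) : List Int → Int → Int → List (Int × Int)
  | [], _, _ => []
  | e :: rest, x, y =>
    (seg x (getPt points e).1).map (fun nx => (nx, y)) ++
      ((seg y (getPt points e).2).map (fun ny => ((getPt points e).1, ny)) ++
        posCat points rest (getPt points e).1 (getPt points e).2)

def endPt (points : List (List Int)) : List Int → Int × Int → Int × Int
  | [], s => s
  | e :: rest, _ => endPt points rest (getPt points e)

def bodyB (points : List (List Int)) (st : Int × Int × List (Int × Int)) (idx : Int) :
    Int × Int × List (Int × Int) :=
  let q := PySem.List.pyGetD points (idx - 1) []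
  let ex := PySem.List.pyGetD q 0 0
  let ey := PySem.List.pyGetD q 1 0
  let sx := if st.1 < ex then (1 : Int) else -1
  let tr := st.2.2 ++ (PySem.List.pyRange (st.1 + sx) (ex + sx) sx).map (fun nx => (nx, st.2.1))
  let sy := if st.2.1 < ey then (1 : Int) else -1
  let tr2 := tr ++ (PySem.List.pyRange (st.2.1 + sy) (ey + sy) sy).map (fun ny => (ex, ny))
  (ex, ey, tr2)

lemma seg_eq_range (a b : Int) :
    seg a b = PySem.List.pyRange (a + (if a < b then (1:Int) else -1))
      (b + (if a < b then (1:Int) else -1)) (if a < b then (1:Int) else -1) := by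
  by_cases h : a < b
  · simp only [seg, if_pos h]
  · simp only [seg, if_neg h]
    ring_nf

lemma trajB (points : List (List Int)) (rest : List Int) (x y : Int) (acc : List (Int × Int)) :
    rest.foldl (bodyB points) (x, y, acc) =
      ((endPt points rest (x, y)).1, (endPt points rest (x, y)).2,
        acc ++ posCat points rest x y) := by
  induction rest generalizing x y acc with
  | nil => simp [endPt, posCat]
  | cons e rest ih =>
    rw [List.foldl_cons]
    have hb : bodyB points (x, y, acc) e =
        ((getPt points e).1, (getPt points e).2,
          (acc ++ (seg x (getPt points e).1).map (fun nx => (nx, y))) ++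
            (seg y (getPt points e).2).map (fun ny => ((getPt points e).1, ny))) := by
      simp only [bodyB, getPt, ← seg_eq_range]
    rw [hb, ih]
    simp [endPt, posCat, List.append_assoc]

lemma stamp_append (n : Int) (l1 l2 : List (Int × Int)) :
    stamp n (l1 ++ l2) = stamp n l1 ++ stamp (n + l1.length) l2 := by
  induction l1 generalizing n with
  | nil => simp [stamp]
  | cons c cs ih =>
    simp only [List.cons_append, stamp, List.length_cons, ih]
    congr 3
    push_cast
    ring

lemma evSteps_eq (points : List (List Int)) (rest : List Int) (x y n : Int) :
    evSteps points rest x y n = stamp n (posCat points rest x y) := by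
  induction rest generalizing x y n with
  | nil => simp [evSteps, posCat, stamp]
  | cons e rest ih =>
    rw [evSteps, posCat, stamp_append, stamp_append, ih]
    simp [List.length_map]

lemma enum_stamp (cs : List (Int × Int)) (n : Int) :
    PySem.List.enumerate cs (n + 1) = stamp n cs := by
  induction cs generalizing n with
  | nil => simp [PySem.List.enumerate, stamp]
  | cons c cs ih =>
    rw [PySem.List.enumerate_cons, stamp, ← ih]

lemma routeB (points : List (List Int)) (evs : List (Int × Int × Int)) (route : List Int) :
    (fun evs route =>
      let p := PySem.List.pyGetD points (PySem.List.pyGetD route 0 0 - 1) []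
      let x := PySem.List.pyGetD p 0 0
      let y := PySem.List.pyGetD p 1 0
      let st := (PySem.List.slice route (some 1) none).foldl
          (fun (st : Int × Int × List (Int × Int)) idx =>
            let q := PySem.List.pyGetD points (idx - 1) []
            let ex := PySem.List.pyGetD q 0 0
            let ey := PySem.List.pyGetD q 1 0
            let sx := if st.1 < ex then (1 : Int) else -1
            let tr := st.2.2 ++
              (PySem.List.pyRange (st.1 + sx) (ex + sx) sx).map (fun nx => (nx, st.2.1))
            let sy := if st.2.1 < ey then (1 : Int) else -1
            let tr2 := tr ++
              (PySem.List.pyRange (st.2.1 + sy) (ey + sy) sy).map (fun ny => (ex, ny))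
            (ex, ey, tr2))
          (x, y, [(x, y)])
      evs ++ (PySem.List.enumerate st.2.2 0).map (fun tp => (tp.1, tp.2.1, tp.2.2)))
      evs route = evs ++ evRoute points route := by
  have hlam : (fun (st : Int × Int × List (Int × Int)) (idx : Int) =>
      let q := PySem.List.pyGetD points (idx - 1) []
      let ex := PySem.List.pyGetD q 0 0
      let ey := PySem.List.pyGetD q 1 0
      let sx := if st.1 < ex then (1 : Int) else -1
      let tr := st.2.2 ++
        (PySem.List.pyRange (st.1 + sx) (ex + sx) sx).map (fun nx => (nx, st.2.1))
      let sy := if st.2.1 < ey then (1 : Int) else -1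
      let tr2 := tr ++
        (PySem.List.pyRange (st.2.1 + sy) (ey + sy) sy).map (fun ny => (ex, ny))
      (ex, ey, tr2)) = bodyB points := rfl
  have hid : (fun tp : Int × Int × Int => (tp.1, tp.2.1, tp.2.2)) = id := rfl
  simp only [hlam, PySem.List.slice_from_one, trajB, hid, List.map_id]
  congr 1
  rw [evRoute, evSteps_eq, ← enum_stamp, List.singleton_append]
  rw [show (0 : Int) + 1 = 1 from rfl, PySem.List.enumerate_cons]
  rfl

def encEv (e : Int × Int × Int) : Lex (Int × Lex (Int × Int)) :=
  toLex (e.1, toLex (e.2.1, e.2.2))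

lemma encEv_inj : Function.Injective encEv := by
  intro a b h
  simp only [encEv, toLex_inj, Prod.mk.injEq] at h
  exact Prod.ext h.1 (Prod.ext h.2.1 h.2.2)

lemma runDups_sorted (S : List (Int × Int × Int))
    (hp : S.Pairwise (fun a b => encEv a ≤ encEv b)) :
    runDups S = ↑(List.countP (fun e => decide (1 < S.count e)) (PySem.Set.ofList S)) := by
  induction S using runDups.induct with
  | case1 => simp [runDups]
  | case2 a t ih =>
    rw [List.pairwise_cons] at hp
    obtain ⟨ha, hpt⟩ := hp
    set run := t.takeWhile (fun b => b == a) with hrundef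
    set rest := t.dropWhile (fun b => b == a) with hrestdef
    have ht : run ++ rest = t := List.takeWhile_append_dropWhile
    have hrun : ∀ b ∈ run, b = a := by
      intro b hb
      have := List.mem_takeWhile_imp (hrundef ▸ hb)
      simpa using this
    have hrest : rest.Pairwise (fun a b => encEv a ≤ encEv b) :=
      hpt.sublist (hrestdef ▸ List.dropWhile_sublist _)
    have hne : ∀ b ∈ rest, b ≠ a := by
      cases hr : rest with
      | nil => simp
      | cons h r' =>
        have hhd := List.head?_dropWhile_not (fun b => b == a) t
        rw [← hrestdef, hr] at hhd
        simp only [List.head?_cons] at hhd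
        have hha : h ≠ a := by simpa using hhd
        have hht : h ∈ t := by
          rw [← ht, hr]
          exact List.mem_append_right _ (List.mem_cons_self ..)
        intro b hb
        rcases List.mem_cons.1 hb with rfl | hb'
        · exact hha
        · rintro rfl
          have h1 : encEv h ≤ encEv b := by
            rw [hr] at hrest
            exact (List.pairwise_cons.1 hrest).1 b hb'
          have h2 : encEv b ≤ encEv h := ha h hht
          exact hha (encEv_inj (le_antisymm h1 h2))
    have hca : (a :: t).count a = 1 + run.length := by
      rw [List.count_cons_self, ← ht, List.count_append]
      have h1 : run.count a = run.length :=
        List.count_eq_length.2 (fun b hb => (hrun b hb).symm)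
      have h2 : rest.count a = 0 :=
        List.count_eq_zero.2 (fun h => hne a h rfl)
      omega
    have hce : ∀ e ∈ rest, (a :: t).count e = rest.count e := by
      intro e he
      have hea : e ≠ a := hne e he
      rw [List.count_cons, ← ht, List.count_append]
      have h0 : run.count e = 0 :=
        List.count_eq_zero.2 (fun h => hea (hrun e h))
      simp [h0]
      exact fun h => hea h.symm
    have hperm : (PySem.Set.ofList (a :: t)).Perm (a :: PySem.Set.ofList rest) := by
      rw [List.perm_ext_iff_of_nodup (PySem.Set.nodup_ofList _)
        (List.nodup_cons.2 ⟨fun h => hne a ((PySem.Set.mem_ofList _ _).1 h) rfl,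
          PySem.Set.nodup_ofList _⟩)]
      intro z
      simp only [PySem.Set.mem_ofList, List.mem_cons]
      constructor
      · rintro (rfl | hz)
        · exact Or.inl rfl
        · rw [← ht] at hz
          rcases List.mem_append.1 hz with h1 | h2
          · exact Or.inl (hrun z h1)
          · exact Or.inr h2
      · rintro (rfl | hz)
        · exact Or.inl rfl
        · refine Or.inr ?_
          rw [← ht]
          exact List.mem_append_right _ hz
    have hq2 : List.countP (fun e => decide (1 < (a :: t).count e)) (PySem.Set.ofList rest)
        = List.countP (fun e => decide (1 < rest.count e)) (PySem.Set.ofList rest) := by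
      apply List.countP_congr
      intro e he
      rw [hce e ((PySem.Set.mem_ofList _ _).1 he)]
    rw [runDups, hperm.countP_eq, List.countP_cons, hq2, ← hrundef, ← hrestdef, ih hrest, hca]
    simp only [decide_eq_true_eq]
    split_ifs with h1 <;> push_cast <;> omega

lemma countP_ofList_perm {L1 L2 : List (Int × Int × Int)} (h : L1.Perm L2)
    (q : Int × Int × Int → Bool) :
    List.countP q (PySem.Set.ofList L1) = List.countP q (PySem.Set.ofList L2) := by
  refine List.Perm.countP_eq q ?_
  rw [List.perm_ext_iff_of_nodup (PySem.Set.nodup_ofList _) (PySem.Set.nodup_ofList _)]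
  intro z
  simp only [PySem.Set.mem_ofList]
  exact h.mem_iff

lemma ansB (E : List (Int × Int × Int)) :
    runDups (PySem.List.sorted E (fun e => toLex (e.1, toLex (e.2.1, e.2.2))) false)
      = ↑(List.countP (fun e => decide (1 < E.count e)) (PySem.Set.ofList E)) := by
  have hkey : (fun e : Int × Int × Int => toLex (e.1, toLex (e.2.1, e.2.2))) = encEv := rfl
  rw [hkey]
  have hperm : (PySem.List.sorted E encEv false).Perm E := PySem.List.sorted_perm E encEv false
  have hp : (PySem.List.sorted E encEv false).Pairwise (fun a b => encEv a ≤ encEv b) :=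
    PySem.List.sorted_pairwise E encEv
  rw [runDups_sorted _ hp]
  have hq : (fun e : Int × Int × Int =>
      decide (1 < (PySem.List.sorted E encEv false).count e)) =
      (fun e => decide (1 < E.count e)) := by
    funext e
    rw [hperm.count_eq]
  rw [hq, countP_ofList_perm hperm]

theorem main_eq (points routes : List (List Int)) :
    solution points routes = solution_alt points routes := by
  have hfunA : (fun d route =>
      let start := PySem.List.pyGetD route 0 0
      let p := PySem.List.pyGetD points (start - 1) []
      let x := PySem.List.pyGetD p 0 0
      let y := PySem.List.pyGetD p 1 0
      let d := PySem.Dict.modify d 0 [] (· ++ [(x, y)])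
      let st := (PySem.List.pyRange 1 (PySem.List.len route)).foldl
          (fun st i =>
            let q := PySem.List.pyGetD points (PySem.List.pyGetD route i 0 - 1) []
            let ex := PySem.List.pyGetD q 0 0
            let ey := PySem.List.pyGetD q 1 0
            let r1 := solWalkX ex st.2.1 st.1 st.2.2.1 st.2.2.2
            let r2 := solWalkY r1.1 ey st.2.1 r1.2.1 r1.2.2
            (r1.1, r2.1, r2.2.1, r2.2.2))
          (x, y, (0 : Int), d)
      st.2.2.2) = (fun d route => (evRoute points route).foldl stepA d) :=
    funext fun d => funext fun route => routeA points d route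
  have hdA : routes.foldl (fun d route =>
      let start := PySem.List.pyGetD route 0 0
      let p := PySem.List.pyGetD points (start - 1) []
      let x := PySem.List.pyGetD p 0 0
      let y := PySem.List.pyGetD p 1 0
      let d := PySem.Dict.modify d 0 [] (· ++ [(x, y)])
      let st := (PySem.List.pyRange 1 (PySem.List.len route)).foldl
          (fun st i =>
            let q := PySem.List.pyGetD points (PySem.List.pyGetD route i 0 - 1) []
            let ex := PySem.List.pyGetD q 0 0
            let ey := PySem.List.pyGetD q 1 0
            let r1 := solWalkX ex st.2.1 st.1 st.2.2.1 st.2.2.2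
            let r2 := solWalkY r1.1 ey st.2.1 r1.2.1 r1.2.2
            (r1.1, r2.1, r2.2.1, r2.2.2))
          (x, y, (0 : Int), d)
      st.2.2.2) PySem.Dict.empty
      = (routes.flatMap (evRoute points)).foldl stepA PySem.Dict.empty := by
    rw [List.foldl_flatMap]
    exact congrFun (congrFun (congrArg List.foldl hfunA) PySem.Dict.empty) routes
  have hfunB : (fun evs route =>
      let p := PySem.List.pyGetD points (PySem.List.pyGetD route 0 0 - 1) []
      let x := PySem.List.pyGetD p 0 0
      let y := PySem.List.pyGetD p 1 0
      let st := (PySem.List.slice route (some 1) none).foldl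
          (fun (st : Int × Int × List (Int × Int)) idx =>
            let q := PySem.List.pyGetD points (idx - 1) []
            let ex := PySem.List.pyGetD q 0 0
            let ey := PySem.List.pyGetD q 1 0
            let sx := if st.1 < ex then (1 : Int) else -1
            let tr := st.2.2 ++
              (PySem.List.pyRange (st.1 + sx) (ex + sx) sx).map (fun nx => (nx, st.2.1))
            let sy := if st.2.1 < ey then (1 : Int) else -1
            let tr2 := tr ++
              (PySem.List.pyRange (st.2.1 + sy) (ey + sy) sy).map (fun ny => (ex, ny))
            (ex, ey, tr2))
          (x, y, [(x, y)])
      evs ++ (PySem.List.enumerate st.2.2 0).map (fun tp => (tp.1, tp.2.1, tp.2.2)))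
      = (fun evs route => evs ++ evRoute points route) :=
    funext fun evs => funext fun route => routeB points evs route
  have hdB : routes.foldl (fun evs route =>
      let p := PySem.List.pyGetD points (PySem.List.pyGetD route 0 0 - 1) []
      let x := PySem.List.pyGetD p 0 0
      let y := PySem.List.pyGetD p 1 0
      let st := (PySem.List.slice route (some 1) none).foldl
          (fun (st : Int × Int × List (Int × Int)) idx =>
            let q := PySem.List.pyGetD points (idx - 1) []
            let ex := PySem.List.pyGetD q 0 0
            let ey := PySem.List.pyGetD q 1 0
            let sx := if st.1 < ex then (1 : Int) else -1
            let tr := st.2.2 ++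
              (PySem.List.pyRange (st.1 + sx) (ex + sx) sx).map (fun nx => (nx, st.2.1))
            let sy := if st.2.1 < ey then (1 : Int) else -1
            let tr2 := tr ++
              (PySem.List.pyRange (st.2.1 + sy) (ey + sy) sy).map (fun ny => (ex, ny))
            (ex, ey, tr2))
          (x, y, [(x, y)])
      evs ++ (PySem.List.enumerate st.2.2 0).map (fun tp => (tp.1, tp.2.1, tp.2.2)))
      ([] : List (Int × Int × Int))
      = routes.flatMap (evRoute points) := by
    rw [hfunB, PySem.List.foldl_append_eq_flatMap (evRoute points) routes []]
    rfl
  have hA : solution points routes =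
      ↑(List.countP (fun e => decide (1 < (routes.flatMap (evRoute points)).count e))
        (PySem.Set.ofList (routes.flatMap (evRoute points)))) :=
    (congrArg (fun d : PySem.Dict Int (List (Int × Int)) =>
      d.keys.foldl (fun answer key =>
        let count := PySem.Dict.counter (d.getD key [])
        count.keys.foldl (fun answer c => if count.getD c 0 > 1 then answer + 1 else answer)
          answer) (0 : Int)) hdA).trans (ansA (routes.flatMap (evRoute points)))
  have hB : solution_alt points routes =
      ↑(List.countP (fun e => decide (1 < (routes.flatMap (evRoute points)).count e))
        (PySem.Set.ofList (routes.flatMap (evRoute points)))) :=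
    (congrArg (fun E : List (Int × Int × Int) =>
      runDups (PySem.List.sorted E (fun e => toLex (e.1, toLex (e.2.1, e.2.2))) false)) hdB).trans
      (ansB (routes.flatMap (evRoute points)))
  exact hA.trans hB.symm

-- ===== VERDICT (by name: the statement is the Claim_ definition above) =====
theorem solution_spec : Claim_equal_solution := by
  intro points routes _ _
  unfold Spec_solution
  exact main_eq points routes
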